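-- pv_equiv track=rewrite | github.com/AICardiologist/FoundationRelativity | paper 65/p65_compute.py | class_number
-- ===== SOURCE A (Python) =====
-- import math
--
-- def class_number(d):
--     """
--     Compute class number of Q(sqrt(-d)) for squarefree d > 0.
--     Uses enumeration of reduced binary quadratic forms of discriminant Delta.
--     Returns (h_K, forms) where forms is list of (a, b, c) reduced forms.
--     """
--     if d % 4 == 3:
--         Delta = -d
--     else:
--         Delta = -4 * d
--
--     absDelta = abs(Delta)
--     forms = []
--     a_max = math.isqrt(absDelta // 3) + 1
--
--     for a in range(1, a_max + 1):
--         for b in range(-a + 1, a + 1):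
--             numerator = b * b - Delta  # b^2 + |Delta|
--             if numerator % (4 * a) != 0:
--                 continue
--             c = numerator // (4 * a)
--             if c < a:
--                 continue
--             if a == c and b < 0:
--                 continue
--             if b == -a:
--                 continue
--             forms.append((a, b, c))
--
--     return len(forms), forms
-- ===== SOURCE B (Python) =====
-- import math
--
-- def class_number(d):
--     """
--     Same result as A, but enumerates (a, c) pairs instead of (a, b):
--     for each a, c runs over the window where t = 4*a*c + Delta lies in [0, a^2],
--     and a form exists iff t is a perfect square s^2 (b = s, and b = -s when legal).
--     Negative-b forms are collected separately and emitted reversed so the output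
--     order (a ascending, b ascending) matches A exactly.
--     """
--     if d % 4 == 3:
--         Delta = -d
--     else:
--         Delta = -4 * d
--
--     a_max = math.isqrt(abs(Delta) // 3) + 1
--     forms = []
--     for a in range(1, a_max + 1):
--         fourA = 4 * a
--         c_lo = max(a, -(Delta // fourA))     # first c with 4*a*c + Delta >= 0
--         c_hi = (a * a - Delta) // fourA      # last  c with 4*a*c + Delta <= a*a
--         neg, pos = [], []
--         for c in range(c_lo, c_hi + 1):
--             t = fourA * c + Delta            # candidate b^2
--             s = math.isqrt(t)
--             if s * s != t:
--                 continue
--             pos.append((a, s, c))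
--             if 0 < s < a and a != c:
--                 neg.append((a, -s, c))
--         forms += neg[::-1] + pos
--     return len(forms), forms
-- ===== Notes on version B (the rewrite author's own statement) =====
-- stated objective: faster
-- what changed: Replaces A's scan of all b in (-a, a] with a divisibility test per b by a scan of the (a, c) window where t = 4*a*c + Delta lies in [0, a^2], accepting c when t is a perfect square s^2 and emitting the b = -s forms reversed so the output order matches A exactly.
import Mathlib
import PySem

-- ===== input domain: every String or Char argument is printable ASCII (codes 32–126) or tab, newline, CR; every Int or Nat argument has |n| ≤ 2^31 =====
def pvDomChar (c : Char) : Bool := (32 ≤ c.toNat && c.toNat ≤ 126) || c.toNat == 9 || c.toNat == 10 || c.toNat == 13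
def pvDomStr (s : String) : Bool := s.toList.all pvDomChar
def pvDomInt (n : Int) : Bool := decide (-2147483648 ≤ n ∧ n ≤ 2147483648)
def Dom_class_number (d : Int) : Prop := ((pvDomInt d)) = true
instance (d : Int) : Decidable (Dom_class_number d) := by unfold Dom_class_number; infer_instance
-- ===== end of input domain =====

-- B replaces A's (a, b) scan with divisibility tests by an (a, c) window scan with a
-- perfect-square test (objective: faster, constant-factor — ~a/4 candidates per a vs 2a).

-- ===== PORT A =====
-- math.isqrt(n) for n ≥ 0 is exactly Nat.sqrt n.toNat (both arguments below are ≥ 0).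
def class_number (d : Int) : Int × (List (Int × Int × Int)) :=
  let Delta : Int := if PySem.Int.mod d 4 = 3 then -d else -4 * d
  let absDelta : Int := |Delta|
  let a_max : Int := ((PySem.Int.floordiv absDelta 3).toNat.sqrt : Int) + 1
  let forms : List (Int × Int × Int) :=
    (PySem.List.pyRange 1 (a_max + 1) 1).foldl (fun forms a =>
      (PySem.List.pyRange (-a + 1) (a + 1) 1).foldl (fun forms b =>
        let numerator := b * b - Delta
        if PySem.Int.mod numerator (4 * a) ≠ 0 then forms
        else
          let c := PySem.Int.floordiv numerator (4 * a)
          if c < a then forms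
          else if a = c ∧ b < 0 then forms
          else if b = -a then forms
          else forms ++ [(a, b, c)]) forms) []
  ((forms.length : Int), forms)

-- ===== PORT B =====
-- math.isqrt(t): t = 4*a*c + Delta is ≥ 0 for every c ≥ c_lo, where it is Nat.sqrt t.toNat.
def class_number_alt (d : Int) : Int × (List (Int × Int × Int)) :=
  let Delta : Int := if PySem.Int.mod d 4 = 3 then -d else -4 * d
  let a_max : Int := ((PySem.Int.floordiv |Delta| 3).toNat.sqrt : Int) + 1
  let forms : List (Int × Int × Int) :=
    (PySem.List.pyRange 1 (a_max + 1) 1).foldl (fun forms a =>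
      let fourA := 4 * a
      let c_lo := max a (-(PySem.Int.floordiv Delta fourA))
      let c_hi := PySem.Int.floordiv (a * a - Delta) fourA
      let np :=
        (PySem.List.pyRange c_lo (c_hi + 1) 1).foldl
          (fun (np : List (Int × Int × Int) × List (Int × Int × Int)) c =>
            let t := fourA * c + Delta
            let s : Int := (t.toNat.sqrt : Int)
            if s * s ≠ t then np
            else ((if 0 < s ∧ s < a ∧ a ≠ c then np.1 ++ [(a, -s, c)] else np.1),
                  np.2 ++ [(a, s, c)])) ([], [])
      forms ++ np.1.reverse ++ np.2) []
  ((forms.length : Int), forms)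

-- ===== PRECONDITION & SPEC =====
def Spec_class_number (d : Int) (out : Int × (List (Int × Int × Int))) : Prop := out = class_number_alt d
instance (d : Int) (out : Int × (List (Int × Int × Int))) : Decidable (Spec_class_number d out) := by unfold Spec_class_number; infer_instance

-- ===== CLAIM (what is proved, stated in full; the proofs are below) =====
def Claim_equal_class_number : Prop := ∀ (d : Int), Dom_class_number d → Spec_class_number d (class_number d)

-- ===== LEMMAS AND PROOFS =====

-- A's accepted triple for a given b (none = A's `continue`).
def fA (Δ a b : Int) : Option (Int × Int × Int) :=
  if PySem.Int.mod (b * b - Δ) (4 * a) = 0 ∧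
     ¬ PySem.Int.floordiv (b * b - Δ) (4 * a) < a ∧
     ¬ (a = PySem.Int.floordiv (b * b - Δ) (4 * a) ∧ b < 0) ∧ b ≠ -a
  then some (a, b, PySem.Int.floordiv (b * b - Δ) (4 * a)) else none

def rowA (Δ a : Int) : List (Int × Int × Int) :=
  (PySem.List.pyRange (-a + 1) (a + 1) 1).filterMap (fA Δ a)

-- B's candidate square root at column c.
def sB (Δ a c : Int) : Int := (((4 * a) * c + Δ).toNat.sqrt : Int)

def fPos (Δ a c : Int) : Option (Int × Int × Int) :=
  if sB Δ a c * sB Δ a c = (4 * a) * c + Δ then some (a, sB Δ a c, c) else none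

def fNeg (Δ a c : Int) : Option (Int × Int × Int) :=
  if sB Δ a c * sB Δ a c = (4 * a) * c + Δ ∧ 0 < sB Δ a c ∧ sB Δ a c < a ∧ a ≠ c
  then some (a, -sB Δ a c, c) else none

def cRange (Δ a : Int) : List Int :=
  PySem.List.pyRange (max a (-(PySem.Int.floordiv Δ (4 * a))))
    (PySem.Int.floordiv (a * a - Δ) (4 * a) + 1) 1

def rowB (Δ a : Int) : List (Int × Int × Int) :=
  ((cRange Δ a).filterMap (fNeg Δ a)).reverse ++ (cRange Δ a).filterMap (fPos Δ a)

-- the shared characterisation: x is a reduced form with first component a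
def P (Δ a : Int) (x : Int × Int × Int) : Prop :=
  x.1 = a ∧ -a < x.2.1 ∧ x.2.1 ≤ a ∧ x.2.1 * x.2.1 - Δ = (4 * a) * x.2.2 ∧
  a ≤ x.2.2 ∧ ¬ (a = x.2.2 ∧ x.2.1 < 0)

theorem fA_eq_some {Δ a b : Int} {x : Int × Int × Int} :
    fA Δ a b = some x ↔
      (PySem.Int.mod (b * b - Δ) (4 * a) = 0 ∧
       ¬ PySem.Int.floordiv (b * b - Δ) (4 * a) < a ∧
       ¬ (a = PySem.Int.floordiv (b * b - Δ) (4 * a) ∧ b < 0) ∧ b ≠ -a) ∧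
      x = (a, b, PySem.Int.floordiv (b * b - Δ) (4 * a)) := by
  unfold fA; split_ifs with h
  · simp [h, eq_comm]
  · exact ⟨fun hx => by simp at hx, fun hx => absurd hx.1 h⟩

theorem fPos_eq_some {Δ a c : Int} {x : Int × Int × Int} :
    fPos Δ a c = some x ↔
      sB Δ a c * sB Δ a c = (4 * a) * c + Δ ∧ x = (a, sB Δ a c, c) := by
  unfold fPos; split_ifs with h
  · simp [h, eq_comm]
  · exact ⟨fun hx => by simp at hx, fun hx => absurd hx.1 h⟩

theorem fNeg_eq_some {Δ a c : Int} {x : Int × Int × Int} :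
    fNeg Δ a c = some x ↔
      (sB Δ a c * sB Δ a c = (4 * a) * c + Δ ∧ 0 < sB Δ a c ∧ sB Δ a c < a ∧ a ≠ c) ∧
      x = (a, -sB Δ a c, c) := by
  unfold fNeg; split_ifs with h
  · simp [h, eq_comm]
  · exact ⟨fun hx => by simp at hx, fun hx => absurd hx.1 h⟩

theorem sB_nonneg (Δ a c : Int) : 0 ≤ sB Δ a c := Int.natCast_nonneg _

theorem sB_of_sq {Δ a c B : Int} (h : B * B = (4 * a) * c + Δ) : sB Δ a c = |B| := by
  have h1 : ((4 * a) * c + Δ).toNat = B.natAbs * B.natAbs := by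
    have := @Int.natAbs_mul_self B
    omega
  unfold sB
  rw [h1, show B.natAbs * B.natAbs = B.natAbs ^ 2 by ring, Nat.sqrt_eq', Int.abs_eq_natAbs]

theorem sq_lt_sq_int {s s' : Int} (h0 : 0 ≤ s) (h0' : 0 ≤ s') (h : s * s < s' * s') :
    s < s' := by nlinarith

theorem sq_le_sq_int {s a : Int} (h0 : 0 ≤ s) (ha : 0 ≤ a) (h : s * s ≤ a * a) :
    s ≤ a := by nlinarith

theorem fourA_pos {a : Int} (ha : 1 ≤ a) : (0:Int) < 4 * a := by omega

theorem fd_eq {Δ a b k : Int} (ha : 1 ≤ a) (h : b * b - Δ = (4 * a) * k) :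
    PySem.Int.floordiv (b * b - Δ) (4 * a) = k := by
  rw [PySem.Int.floordiv_eq_ediv_of_pos (fourA_pos ha), h,
    Int.mul_ediv_cancel_left _ (by omega : (4:Int) * a ≠ 0)]

theorem mem_rowA {Δ a : Int} (ha : 1 ≤ a) {x : Int × Int × Int} :
    x ∈ rowA Δ a ↔ P Δ a x := by
  unfold rowA P
  rw [List.mem_filterMap]
  constructor
  · rintro ⟨b, hb, hsome⟩
    rw [PySem.List.mem_pyRange_one] at hb
    rw [fA_eq_some] at hsome
    obtain ⟨⟨hm, hca, hneg, _⟩, hx⟩ := hsome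
    obtain ⟨k, hk⟩ := (PySem.Int.mod_eq_zero_iff_dvd _ _).1 hm
    have hfd := fd_eq ha hk
    subst hx
    dsimp only
    rw [hfd] at hneg hca ⊢
    exact ⟨rfl, by omega, by omega, hk, by omega, hneg⟩
  · rintro ⟨h1, h2, h3, h4, h5, h6⟩
    obtain ⟨x1, x2, x3⟩ := x
    dsimp only at h1 h2 h3 h4 h5 h6
    have hfd := fd_eq ha h4
    refine ⟨x2, ?_, ?_⟩
    · rw [PySem.List.mem_pyRange_one]; omega
    · rw [fA_eq_some, hfd]
      exact ⟨⟨(PySem.Int.mod_eq_zero_iff_dvd _ _).2 ⟨x3, h4⟩, by omega, h6, by omega⟩, by rw [h1]⟩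

theorem mem_cRange {Δ a c : Int} (ha : 1 ≤ a) :
    c ∈ cRange Δ a ↔ (a ≤ c ∧ 0 ≤ (4 * a) * c + Δ ∧ (4 * a) * c + Δ ≤ a * a) := by
  unfold cRange
  rw [PySem.List.mem_pyRange_one, max_le_iff]
  have h4a : (0:Int) < 4 * a := by omega
  constructor
  · rintro ⟨⟨hlo1, hlo2⟩, hhi⟩
    have h1 : -c ≤ PySem.Int.floordiv Δ (4 * a) := by omega
    rw [PySem.Int.le_floordiv_iff_mul_le h4a] at h1
    have h2 : c ≤ PySem.Int.floordiv (a * a - Δ) (4 * a) := by omega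
    rw [PySem.Int.le_floordiv_iff_mul_le h4a] at h2
    exact ⟨hlo1, by linarith, by linarith⟩
  · rintro ⟨h1, h2, h3⟩
    have hlo2 : -c ≤ PySem.Int.floordiv Δ (4 * a) :=
      (PySem.Int.le_floordiv_iff_mul_le h4a).2 (by linarith)
    have hhi : c ≤ PySem.Int.floordiv (a * a - Δ) (4 * a) :=
      (PySem.Int.le_floordiv_iff_mul_le h4a).2 (by linarith)
    exact ⟨⟨h1, by omega⟩, by omega⟩

theorem mem_rowB {Δ a : Int} (ha : 1 ≤ a) {x : Int × Int × Int} :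
    x ∈ rowB Δ a ↔ P Δ a x := by
  unfold rowB P
  rw [List.mem_append, List.mem_reverse, List.mem_filterMap, List.mem_filterMap]
  constructor
  · rintro (⟨c, hc, hsome⟩ | ⟨c, hc, hsome⟩)
    · rw [mem_cRange ha] at hc
      rw [fNeg_eq_some] at hsome
      obtain ⟨⟨hsq, hpos, hlt, hne⟩, hx⟩ := hsome
      subst hx
      dsimp only
      exact ⟨rfl, by omega, by omega, by nlinarith [hsq], hc.1, by omega⟩
    · rw [mem_cRange ha] at hc
      rw [fPos_eq_some] at hsome
      obtain ⟨hsq, hx⟩ := hsome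
      subst hx
      have hs0 := sB_nonneg Δ a c
      have hle : sB Δ a c ≤ a := by
        refine sq_le_sq_int hs0 (by omega) ?_
        rw [hsq]; exact hc.2.2
      dsimp only
      exact ⟨rfl, by omega, hle, by omega, hc.1, by omega⟩
  · rintro ⟨h1, h2, h3, h4, h5, h6⟩
    obtain ⟨x1, x2, x3⟩ := x
    dsimp only at h1 h2 h3 h4 h5 h6
    have hsq : x2 * x2 = (4 * a) * x3 + Δ := by linarith
    have hc : x3 ∈ cRange Δ a := by
      rw [mem_cRange ha]
      refine ⟨h5, ?_, ?_⟩
      · rw [← hsq]; exact mul_self_nonneg x2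
      · rw [← hsq]; nlinarith
    have hsB := sB_of_sq hsq
    rcases (by omega : 0 ≤ x2 ∨ x2 < 0) with hx2 | hx2
    · refine Or.inr ⟨x3, hc, ?_⟩
      rw [fPos_eq_some, hsB, abs_of_nonneg hx2]
      exact ⟨hsq, by rw [h1]⟩
    · refine Or.inl ⟨x3, hc, ?_⟩
      rw [fNeg_eq_some, hsB, abs_of_neg hx2]
      refine ⟨⟨by rw [show -x2 * -x2 = x2 * x2 by ring]; exact hsq, by omega, by omega, by omega⟩, ?_⟩
      rw [h1]; simp

theorem rowA_pairwise (Δ a : Int) :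
    (rowA Δ a).Pairwise (fun x y => x.2.1 < y.2.1) := by
  unfold rowA
  rw [List.pairwise_filterMap]
  refine (PySem.List.pairwise_lt_pyRange_one _ _).imp ?_
  intro b b' hlt x hx y hy
  rw [fA_eq_some] at hx hy
  rw [hx.2, hy.2]
  exact hlt

theorem rowB_pairwise {Δ a : Int} (ha : 1 ≤ a) :
    (rowB Δ a).Pairwise (fun x y => x.2.1 < y.2.1) := by
  unfold rowB
  rw [List.pairwise_append]
  refine ⟨?_, ?_, ?_⟩
  · rw [List.pairwise_reverse, List.pairwise_filterMap]
    refine (PySem.List.pairwise_lt_pyRange_one _ _).imp ?_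
    intro c c' hlt x hx y hy
    rw [fNeg_eq_some] at hx hy
    rw [hx.2, hy.2]
    have hs := hx.1; have hs' := hy.1
    have hmono : sB Δ a c * sB Δ a c < sB Δ a c' * sB Δ a c' := by
      rw [hs.1, hs'.1]; nlinarith
    have := sq_lt_sq_int (sB_nonneg Δ a c) (sB_nonneg Δ a c') hmono
    dsimp only
    omega
  · rw [List.pairwise_filterMap]
    refine (PySem.List.pairwise_lt_pyRange_one _ _).imp ?_
    intro c c' hlt x hx y hy
    rw [fPos_eq_some] at hx hy
    rw [hx.2, hy.2]
    have hmono : sB Δ a c * sB Δ a c < sB Δ a c' * sB Δ a c' := by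
      rw [hx.1, hy.1]; nlinarith
    exact sq_lt_sq_int (sB_nonneg Δ a c) (sB_nonneg Δ a c') hmono
  · intro x hx y hy
    rw [List.mem_reverse, List.mem_filterMap] at hx
    rw [List.mem_filterMap] at hy
    obtain ⟨c, _, hc⟩ := hx; obtain ⟨c', _, hc'⟩ := hy
    rw [fNeg_eq_some] at hc; rw [fPos_eq_some] at hc'
    rw [hc.2, hc'.2]
    have := hc.1.2.1
    have := sB_nonneg Δ a c'
    dsimp only
    omega

theorem rowA_eq_rowB {Δ a : Int} (ha : 1 ≤ a) : rowA Δ a = rowB Δ a := by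
  have hA := rowA_pairwise Δ a
  have hB := rowB_pairwise (Δ := Δ) ha
  have hnA : (rowA Δ a).Nodup := hA.imp (fun {x y} h heq => by subst heq; omega)
  have hnB : (rowB Δ a).Nodup := hB.imp (fun {x y} h heq => by subst heq; omega)
  refine List.Perm.eq_of_pairwise (fun x y _ _ h1 h2 => absurd h2 (by omega)) hA hB ?_
  exact (List.perm_ext_iff_of_nodup hnA hnB).2 (fun x => (mem_rowA ha).trans (mem_rowB ha).symm)

theorem foldlA (Δ a : Int) (forms : List (Int × Int × Int)) :
    (PySem.List.pyRange (-a + 1) (a + 1) 1).foldl (fun forms b =>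
        let numerator := b * b - Δ
        if PySem.Int.mod numerator (4 * a) ≠ 0 then forms
        else
          let c := PySem.Int.floordiv numerator (4 * a)
          if c < a then forms
          else if a = c ∧ b < 0 then forms
          else if b = -a then forms
          else forms ++ [(a, b, c)]) forms = forms ++ rowA Δ a := by
  rw [PySem.List.foldl_congr_mem _ _ (fun forms b => forms ++ (fA Δ a b).toList) _ ?_]
  · rw [PySem.List.foldl_append_eq_flatMap, rowA, List.filterMap_eq_flatMap_toList]
  · intro acc b _
    simp only [fA, ne_eq]
    split_ifs <;> first | (simp; done) | (exfalso; tauto)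

theorem foldlB (Δ a : Int) (l : List Int) (n p : List (Int × Int × Int)) :
    l.foldl (fun (np : List (Int × Int × Int) × List (Int × Int × Int)) c =>
        let t := (4 * a) * c + Δ
        let s : Int := (t.toNat.sqrt : Int)
        if s * s ≠ t then np
        else ((if 0 < s ∧ s < a ∧ a ≠ c then np.1 ++ [(a, -s, c)] else np.1),
              np.2 ++ [(a, s, c)])) (n, p)
      = (n ++ l.filterMap (fNeg Δ a), p ++ l.filterMap (fPos Δ a)) := by
  induction l generalizing n p with
  | nil => simp
  | cons c l ih =>
    simp only [List.foldl_cons, List.filterMap_cons]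
    have hstep : (let t := (4 * a) * c + Δ
        let s : Int := (t.toNat.sqrt : Int)
        if s * s ≠ t then ((n, p) : List (Int × Int × Int) × List (Int × Int × Int))
        else ((if 0 < s ∧ s < a ∧ a ≠ c then (n, p).1 ++ [(a, -s, c)] else (n, p).1),
              (n, p).2 ++ [(a, s, c)]))
        = (n ++ (fNeg Δ a c).toList, p ++ (fPos Δ a c).toList) := by
      simp only [fNeg, fPos, sB]
      split_ifs <;> simp_all
    rw [hstep, ih]
    cases hn : fNeg Δ a c <;> cases hp : fPos Δ a c <;> simp

theorem forms_eq (Δ m : Int) :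
    (PySem.List.pyRange 1 m 1).foldl (fun forms a =>
      (PySem.List.pyRange (-a + 1) (a + 1) 1).foldl (fun forms b =>
        let numerator := b * b - Δ
        if PySem.Int.mod numerator (4 * a) ≠ 0 then forms
        else
          let c := PySem.Int.floordiv numerator (4 * a)
          if c < a then forms
          else if a = c ∧ b < 0 then forms
          else if b = -a then forms
          else forms ++ [(a, b, c)]) forms) []
    = (PySem.List.pyRange 1 m 1).foldl (fun forms a =>
      let fourA := 4 * a
      let c_lo := max a (-(PySem.Int.floordiv Δ fourA))
      let c_hi := PySem.Int.floordiv (a * a - Δ) fourA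
      let np :=
        (PySem.List.pyRange c_lo (c_hi + 1) 1).foldl
          (fun (np : List (Int × Int × Int) × List (Int × Int × Int)) c =>
            let t := fourA * c + Δ
            let s : Int := (t.toNat.sqrt : Int)
            if s * s ≠ t then np
            else ((if 0 < s ∧ s < a ∧ a ≠ c then np.1 ++ [(a, -s, c)] else np.1),
                  np.2 ++ [(a, s, c)])) ([], [])
      forms ++ np.1.reverse ++ np.2) [] := by
  refine (PySem.List.foldl_congr_mem _ _ (fun forms a => forms ++ rowA Δ a) _ ?_).trans
    (PySem.List.foldl_congr_mem _ _ (fun forms a => forms ++ rowA Δ a) _ ?_).symm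
  · intro acc a _
    exact foldlA Δ a acc
  · intro acc a ha
    have h1 : (1:Int) ≤ a := (PySem.List.mem_pyRange_one.1 ha).1
    show _ = acc ++ rowA Δ a
    simp only []
    rw [foldlB Δ a _ [] []]
    rw [rowA_eq_rowB h1, rowB, cRange]
    simp [List.append_assoc]

-- ===== VERDICT (by name: the statement is the Claim_ definition above) =====
theorem class_number_spec : Claim_equal_class_number := by
  intro d _
  unfold Spec_class_number class_number class_number_alt
  simp only []
  rw [forms_eq]
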